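-- pv_equiv track=rewrite | github.com/t4rf9/AutoJudge | 5-2_aword.py | _compute
-- ===== SOURCE A (Python) =====
-- def _compute(input_content: str) -> str:
--     tokens = input_content.split()
--
--     res, length = [], 0
--
--     for token in tokens:
--         if not "a" in token.lower():
--             continue
--         token_length = len(token)
--         if token_length > length:
--             res = [token]
--             length = token_length
--         elif token_length == length:
--             res.append(token)
--
--     if len(res) == 0:
--         return "Error\n"
--     else:
--         return "\n".join(res) + "\n"
-- ===== SOURCE B (Python) =====
-- def _compute(input_content: str) -> str:
--     filtered = [t for t in input_content.split() if "a" in t.lower()]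
--     if not filtered:
--         return "Error\n"
--     m = max(len(t) for t in filtered)
--     return "\n".join(t for t in filtered if len(t) == m) + "\n"
-- ===== Notes on version B (the rewrite author's own statement) =====
-- stated objective: simpler
-- what changed: Replaces the stateful single-pass running-max/reset accumulator with a filter-then-max-then-collect decomposition (filter tokens containing 'a', take max length, join the ones of that length).
import Mathlib
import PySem

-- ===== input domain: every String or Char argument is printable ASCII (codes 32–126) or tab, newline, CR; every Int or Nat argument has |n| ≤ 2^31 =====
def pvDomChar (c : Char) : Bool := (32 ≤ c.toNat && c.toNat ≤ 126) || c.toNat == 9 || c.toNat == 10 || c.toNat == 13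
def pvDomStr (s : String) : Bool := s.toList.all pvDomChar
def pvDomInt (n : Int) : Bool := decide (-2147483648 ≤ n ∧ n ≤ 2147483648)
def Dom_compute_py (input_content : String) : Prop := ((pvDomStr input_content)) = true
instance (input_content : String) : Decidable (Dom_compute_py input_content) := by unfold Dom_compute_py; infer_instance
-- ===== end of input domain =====

-- B replaces A's stateful running-max/reset loop with a filter-then-max-then-collect decomposition (objective: simpler).

-- ===== PORT A =====
-- one step of A's for-loop over tokens; state = (res, length)
def computeStep (acc : List String × Int) (token : String) : List String × Int :=
  if ¬ (PySem.Str.isIn "a" (PySem.Str.lower token) = true) then acc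
  else
    let token_length := PySem.Str.len token
    if token_length > acc.2 then ([token], token_length)
    else if token_length = acc.2 then (acc.1 ++ [token], acc.2)
    else acc

def compute_py (input_content : String) : String :=
  let tokens := PySem.Str.split₀ input_content
  let st := tokens.foldl computeStep ([], 0)
  if PySem.List.len st.1 = 0 then "Error\n"
  else PySem.Str.join "\n" st.1 ++ "\n"

-- ===== PORT B =====
def compute_py_alt (input_content : String) : String :=
  let filtered := (PySem.Str.split₀ input_content).filter
      (fun t => PySem.Str.isIn "a" (PySem.Str.lower t))
  match filtered with
  | [] => "Error\n"
  | t :: ts =>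
      -- m = max(len(t) for t in filtered): Python's max over a nonempty iterable
      let m := (ts.map PySem.Str.len).foldl max (PySem.Str.len t)
      PySem.Str.join "\n" (filtered.filter (fun u => PySem.Str.len u = m)) ++ "\n"

-- ===== PRECONDITION & SPEC =====
def Spec_compute_py (input_content : String) (out : String) : Prop := out = compute_py_alt input_content
instance (input_content : String) (out : String) : Decidable (Spec_compute_py input_content out) := by unfold Spec_compute_py; infer_instance

-- ===== CLAIM (what is proved, stated in full; the proofs are below) =====
def Claim_equal_compute_py : Prop := ∀ (input_content : String), Dom_compute_py input_content → Spec_compute_py input_content (compute_py input_content)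

-- ===== LEMMAS AND PROOFS =====

-- A's loop state after any token list ts: res is exactly the 'a'-tokens of maximal
-- length (in order) and length is that maximum (0 when no 'a'-token yet).
def pvP (t : String) : Bool := PySem.Str.isIn "a" (PySem.Str.lower t)

def pvM (F : List String) : Int := (F.map PySem.Str.len).foldl max 0

lemma pv_len_nonneg (t : String) : 0 ≤ PySem.Str.len t := by
  simp [PySem.Str.len_eq]

lemma pv_loop_char (ts : List String) :
    ts.foldl computeStep ([], 0) =
      ((ts.filter pvP).filter (fun u => PySem.Str.len u = pvM (ts.filter pvP)),
        pvM (ts.filter pvP)) := by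
  induction ts using List.reverseRecOn with
  | nil => simp [pvM]
  | append_singleton ts t ih =>
      rw [List.foldl_append, List.foldl_cons, List.foldl_nil, ih]
      by_cases hp : pvP t
      · have hF : (ts ++ [t]).filter pvP = ts.filter pvP ++ [t] := by
          simp [List.filter_append, hp]
        have hub : ∀ u ∈ ts.filter pvP, PySem.Str.len u ≤ pvM (ts.filter pvP) := by
          intro u hu
          exact (PySem.List.le_foldl_max ((ts.filter pvP).map PySem.Str.len) 0).2 _
            (List.mem_map_of_mem hu)
        have hM' : pvM (ts.filter pvP ++ [t]) = max (pvM (ts.filter pvP)) (PySem.Str.len t) := by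
          simp [pvM, List.map_append, List.foldl_append]
        have hp' : ¬ ¬ (PySem.Str.isIn "a" (PySem.Str.lower t) = true) := by
          simpa [pvP] using hp
        rw [hF, hM']
        unfold computeStep
        rw [if_neg hp']
        by_cases hgt : PySem.Str.len t > pvM (ts.filter pvP)
        · have hmax : max (pvM (ts.filter pvP)) (PySem.Str.len t) = PySem.Str.len t := by omega
          rw [if_pos hgt, hmax, List.filter_append]
          have h1 : (ts.filter pvP).filter (fun u => PySem.Str.len u = PySem.Str.len t) = [] := by
            apply List.filter_eq_nil_iff.2
            intro u hu
            have h2 := hub u hu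
            simp only [decide_eq_true_eq]
            intro h3
            omega
          rw [h1, List.nil_append, List.filter_cons, List.filter_nil,
            if_pos (by simp : (decide (PySem.Str.len t = PySem.Str.len t)) = true)]
        · have hmax : max (pvM (ts.filter pvP)) (PySem.Str.len t) = pvM (ts.filter pvP) := by omega
          rw [if_neg hgt, hmax, List.filter_append]
          by_cases heq : PySem.Str.len t = pvM (ts.filter pvP)
          · rw [if_pos heq, List.filter_cons, List.filter_nil,
              if_pos (by simpa using heq : (decide (PySem.Str.len t = pvM (List.filter pvP ts))) = true)]
          · rw [if_neg heq, List.filter_cons, List.filter_nil,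
              if_neg (by simpa using heq : ¬ (decide (PySem.Str.len t = pvM (List.filter pvP ts))) = true),
              List.append_nil]
      · have hF : (ts ++ [t]).filter pvP = ts.filter pvP := by
          simp [List.filter_append, hp]
        have hp' : ¬ (PySem.Str.isIn "a" (PySem.Str.lower t) = true) := by
          simpa [pvP] using hp
        rw [hF]
        unfold computeStep
        rw [if_pos hp']

lemma pv_max_attained (F : List String) (h : F ≠ []) :
    ∃ u ∈ F, PySem.Str.len u = pvM F := by
  obtain ⟨t, ts, rfl⟩ := List.exists_cons_of_ne_nil h
  rcases PySem.List.foldl_max_mem (((t :: ts).map PySem.Str.len)) 0 with h0 | hmem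
  · refine ⟨t, List.mem_cons_self .., ?_⟩
    have h1 := (PySem.List.le_foldl_max ((t :: ts).map PySem.Str.len) 0).2
      (PySem.Str.len t) (by simp)
    have h2 := pv_len_nonneg t
    unfold pvM
    omega
  · obtain ⟨u, hu, hlen⟩ := List.mem_map.1 hmem
    exact ⟨u, hu, hlen⟩

-- ===== VERDICT (by name: the statement is the Claim_ definition above) =====
theorem compute_py_spec : Claim_equal_compute_py := by
  intro s _
  unfold Spec_compute_py compute_py compute_py_alt
  have hfun : (fun t => PySem.Str.isIn "a" (PySem.Str.lower t)) = pvP := rfl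
  simp only [hfun, pv_loop_char]
  match hFe : (PySem.Str.split₀ s).filter pvP with
  | [] => simp [pvM]
  | t :: ts =>
      have hm : (ts.map PySem.Str.len).foldl max (PySem.Str.len t) = pvM (t :: ts) := by
        have h0 : max 0 (PySem.Str.len t) = PySem.Str.len t := by
          have := pv_len_nonneg t; omega
        simp only [pvM, List.map_cons, List.foldl_cons, h0]
      obtain ⟨u, hu, hlen⟩ := pv_max_attained (t :: ts) (by simp)
      have hne : (t :: ts).filter (fun v => PySem.Str.len v = pvM (t :: ts)) ≠ [] := by
        intro hnil
        have h4 := List.filter_eq_nil_iff.1 hnil u hu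
        simp only [decide_eq_true_eq] at h4
        exact h4 hlen
      have hlen0 : ¬ PySem.List.len ((t :: ts).filter (fun v => PySem.Str.len v = pvM (t :: ts))) = 0 := by
        rw [PySem.List.len_eq]
        simpa [List.length_eq_zero_iff] using hne
      simp only [hm, if_neg hlen0]
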